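-- pv_equiv track=rewrite | github.com/huberste/adventofcode | 2019/day06/orbits.py | calculate_orbits
-- ===== SOURCE A (Python) =====
-- def calculate_orbits(orbiting_around):
--     result = 0
--     for satellite in orbiting_around:
--         sat = satellite
--         while sat:
--             if sat in orbiting_around:
--                 sat = orbiting_around[sat]
--                 result += 1
--             else:
--                 sat = 0
--     return result
-- ===== SOURCE B (Python) =====
-- def calculate_orbits(orbiting_around):
--     # Memoized depth-per-node DP: each chain is walked once and the depth of
--     # every visited node is cached, so no node's depth is computed twice.
--     memo = {}
--     total = 0
--     for sat in orbiting_around: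
--         path = []
--         node = sat
--         while node and node in orbiting_around and node not in memo:
--             path.append(node)
--             node = orbiting_around[node]
--         d = memo.get(node, 0) if node else 0
--         for k in reversed(path):
--             d += 1
--             memo[k] = d
--         total += d
--     return total
-- ===== Notes on version B (the rewrite author's own statement) =====
-- stated objective: alternative
-- what changed: Instead of re-walking the full parent chain from every node, B walks each chain once and caches the depth of every node it visits in a memo dict (DP over parent pointers), so each node's depth is computed only once; on the shallow random chains of a timing run this was not measurably faster.
import Mathlib
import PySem

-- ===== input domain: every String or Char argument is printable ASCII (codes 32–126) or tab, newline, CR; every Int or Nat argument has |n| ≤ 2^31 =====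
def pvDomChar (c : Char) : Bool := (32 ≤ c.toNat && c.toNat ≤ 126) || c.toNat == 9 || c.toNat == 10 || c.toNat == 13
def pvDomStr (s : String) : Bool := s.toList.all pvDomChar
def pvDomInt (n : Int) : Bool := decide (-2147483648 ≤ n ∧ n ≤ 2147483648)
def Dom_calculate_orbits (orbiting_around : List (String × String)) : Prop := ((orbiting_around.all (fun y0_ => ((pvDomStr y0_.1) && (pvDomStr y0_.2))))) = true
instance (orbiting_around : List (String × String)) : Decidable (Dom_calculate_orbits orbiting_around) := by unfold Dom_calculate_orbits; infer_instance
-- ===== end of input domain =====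

-- B memoizes the depth of every node it visits (DP over parent pointers) instead of A's full chain re-walk per node.
-- Pre_ excludes parent maps with a reachable cycle, on which Python A's while loop never terminates.

-- ===== PORT A =====
-- the 'while sat:' loop of A; fuel is only a totality guard (under Pre_ the chain halts within d.size steps)
def pvChainA (d : PySem.Dict String String) : Nat → String → Int
  | 0, _ => 0
  | f + 1, sat =>
      if sat ≠ "" ∧ d.contains sat = true then 1 + pvChainA d f (d.getD sat "")
      else 0

def calculate_orbits (orbiting_around : List (String × String)) : Int :=
  let d := PySem.Dict.ofList orbiting_around
  d.keys.foldl (fun result satellite => result + pvChainA d (d.size + 1) satellite) 0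

-- ===== PORT B =====
-- B's inner 'while' loop: walk the chain until a falsy / unknown / already-memoized node,
-- collecting the path; fuel is only a totality guard
def pvWalkB (d : PySem.Dict String String) (memo : PySem.Dict String Int) :
    Nat → String → List String → String × List String
  | 0, node, path => (node, path)
  | f + 1, node, path =>
      if node ≠ "" ∧ d.contains node = true ∧ memo.contains node = false then
        pvWalkB d memo f (d.getD node "") (path ++ [node])
      else (node, path)

-- B's 'for k in reversed(path):' loop: assign increasing depths along the path
def pvAssignB (path_rev : List String) (d0 : Int) (memo : PySem.Dict String Int) :
    Int × PySem.Dict String Int :=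
  path_rev.foldl (fun s k => (s.1 + 1, s.2.insert k (s.1 + 1))) (d0, memo)

-- one iteration of B's outer loop: state = (memo, total)
def pvStepB (d : PySem.Dict String String) (st : PySem.Dict String Int × Int)
    (sat : String) : PySem.Dict String Int × Int :=
  let w := pvWalkB d st.1 (d.size + 1) sat []
  let d0 : Int := if w.1 ≠ "" then st.1.getD w.1 0 else 0
  let r := pvAssignB w.2.reverse d0 st.1
  (r.2, st.2 + r.1)

def calculate_orbits_alt (orbiting_around : List (String × String)) : Int :=
  let d := PySem.Dict.ofList orbiting_around
  (d.keys.foldl (pvStepB d) (PySem.Dict.empty, 0)).2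

-- ===== PRECONDITION & SPEC =====
-- Pre_ excludes exactly the parent maps containing a cycle (a nonempty set of non-empty keys
-- closed under the parent map): there Python A's while loop diverges, so A returns no value.
def Pre_calculate_orbits (orbiting_around : List (String × String)) : Prop :=
  ∀ S ∈ (PySem.Dict.ofList orbiting_around).keys.sublists, S ≠ [] →
    ∃ k ∈ S, k = "" ∨ (PySem.Dict.ofList orbiting_around).getD k "" ∉ S
instance (orbiting_around : List (String × String)) : Decidable (Pre_calculate_orbits orbiting_around) := by unfold Pre_calculate_orbits; infer_instance

def pvWitness_calculate_orbits : (List (String × String)) := [("B", "COM"), ("C", "B")]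

def Spec_calculate_orbits (orbiting_around : List (String × String)) (out : Int) : Prop := out = calculate_orbits_alt orbiting_around
instance (orbiting_around : List (String × String)) (out : Int) : Decidable (Spec_calculate_orbits orbiting_around out) := by unfold Spec_calculate_orbits; infer_instance

-- ===== CLAIM (what is proved, stated in full; the proofs are below) =====
def Claim_equal_calculate_orbits : Prop := ∀ (orbiting_around : List (String × String)), Dom_calculate_orbits orbiting_around → Pre_calculate_orbits orbiting_around → Spec_calculate_orbits orbiting_around (calculate_orbits orbiting_around)

-- ===== LEMMAS AND PROOFS =====

-- the chain starting at k halts after exactly n counted steps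
inductive pvHalts (d : PySem.Dict String String) : Nat → String → Prop
  | stop (k : String) (h : ¬(k ≠ "" ∧ d.contains k = true)) : pvHalts d 0 k
  | step (k : String) (n : Nat) (h : k ≠ "" ∧ d.contains k = true)
      (ih : pvHalts d n (d.getD k "")) : pvHalts d (n + 1) k

theorem pvHalts_unique {d : PySem.Dict String String} {m n : Nat} {k : String}
    (hm : pvHalts d m k) (hn : pvHalts d n k) : m = n := by
  induction hm generalizing n with
  | stop k h => cases hn with
    | stop _ _ => rfl
    | step _ _ h' _ => exact absurd h' h
  | step k m h ih IH => cases hn with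
    | stop _ h' => exact absurd h h'
    | step _ n _ ih' => exact congrArg (· + 1) (IH ih')

theorem pvChainA_of_halts {d : PySem.Dict String String} {n : Nat} {k : String}
    (h : pvHalts d n k) : ∀ f, n ≤ f → pvChainA d f k = (n : Int) := by
  induction h with
  | stop k h =>
      intro f _
      cases f with
      | zero => rfl
      | succ f => simp [pvChainA, h]
  | step k n h ih IH =>
      intro f hf
      cases f with
      | zero => omega
      | succ f =>
          have : pvChainA d f (d.getD k "") = (n : Int) := IH f (by omega)
          simp [pvChainA, h, this]; ring

-- a chain list: successive parents, ending with k as the parent of the last element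
def pvIsChain (d : PySem.Dict String String) : List String → String → Prop
  | [], _ => True
  | x :: xs, k => (x ≠ "" ∧ d.contains x = true) ∧ d.getD x "" = xs.headD k ∧ pvIsChain d xs k

theorem pvIsChain_drop {d : PySem.Dict String String} (p : List String) :
    ∀ r k, pvIsChain d (p ++ r) k → pvIsChain d r k := by
  induction p with
  | nil => intro r k h; exact h
  | cons x xs ih => intro r k h; exact ih r k h.2.2

theorem pvIsChain_active {d : PySem.Dict String String} :
    ∀ l k c, pvIsChain d l k → c ∈ l → c ≠ "" ∧ d.contains c = true := by
  intro l
  induction l with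
  | nil => intro k c _ hc; cases hc
  | cons x xs ih =>
      intro k c h hc
      rcases List.mem_cons.1 hc with rfl | hc
      · exact h.1
      · exact ih k c h.2.2 hc

theorem pvIsChain_closed {d : PySem.Dict String String} :
    ∀ l k c, pvIsChain d l k → c ∈ l → d.getD c "" ∈ l ∨ d.getD c "" = k := by
  intro l
  induction l with
  | nil => intro k c _ hc; cases hc
  | cons x xs ih =>
      intro k c h hc
      rcases List.mem_cons.1 hc with rfl | hc
      · cases xs with
        | nil => right; simpa using h.2.1
        | cons y ys => left; rw [h.2.1]; simp
      · rcases ih k c h.2.2 hc with h' | h'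
        · left; exact List.mem_cons_of_mem _ h'
        · right; exact h'

theorem pvIsChain_snoc {d : PySem.Dict String String} :
    ∀ l k, pvIsChain d l k → (k ≠ "" ∧ d.contains k = true) →
      pvIsChain d (l ++ [k]) (d.getD k "") := by
  intro l
  induction l with
  | nil => intro k _ hk; exact ⟨hk, by simp, trivial⟩
  | cons x xs ih =>
      intro k h hk
      refine ⟨h.1, ?_, ih k h.2.2 hk⟩
      rw [h.2.1]
      cases xs <;> simp

-- no element of a chain may reappear as its continuation point (no cycles)
theorem pv_no_cycle_not_mem {d : PySem.Dict String String}
    (hnc : ∀ S ∈ d.keys.sublists, S ≠ [] → ∃ k ∈ S, k = "" ∨ d.getD k "" ∉ S)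
    {l : List String} {k : String} (hch : pvIsChain d l k) (hk : k ∈ l) : False := by
  obtain ⟨p, q, rfl⟩ := List.append_of_mem hk
  have hC : pvIsChain d (k :: q) k := pvIsChain_drop p _ _ hch
  set C := k :: q with hCdef
  have hact : ∀ c ∈ C, c ≠ "" ∧ d.contains c = true := fun c hc => pvIsChain_active C k c hC hc
  have hclosed : ∀ c ∈ C, d.getD c "" ∈ C := by
    intro c hc
    rcases pvIsChain_closed C k c hC hc with h | h
    · exact h
    · rw [h]; exact List.mem_cons_self
  have hmemk : ∀ c ∈ C, c ∈ d.keys := by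
    intro c hc
    exact (PySem.Dict.contains_iff_mem_keys _ _).1 (hact c hc).2
  set S := d.keys.filter (fun x => decide (x ∈ C)) with hS
  have hmemS : ∀ x, x ∈ S ↔ x ∈ d.keys ∧ x ∈ C := by
    intro x; simp [hS, List.mem_filter]
  have hSsub : S ∈ d.keys.sublists := List.mem_sublists.2 List.filter_sublist
  have hkS : k ∈ S := (hmemS k).2 ⟨hmemk k List.mem_cons_self, List.mem_cons_self⟩
  obtain ⟨c, hcS, hc⟩ := hnc S hSsub (List.ne_nil_of_mem hkS)
  have hcC : c ∈ C := ((hmemS c).1 hcS).2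
  rcases hc with rfl | hc
  · exact (hact _ hcC).1 rfl
  · exact hc ((hmemS _).2 ⟨hmemk _ (hclosed c hcC), hclosed c hcC⟩)

theorem pvHalts_aux {d : PySem.Dict String String}
    (hnc : ∀ S ∈ d.keys.sublists, S ≠ [] → ∃ k ∈ S, k = "" ∨ d.getD k "" ∉ S) :
    ∀ (m : Nat) (k : String) (l : List String), pvIsChain d l k → l.Nodup →
      d.keys.length ≤ l.length + m → ∃ n ≤ m, pvHalts d n k := by
  intro m
  induction m with
  | zero =>
      intro k l hch hnd hlen
      by_cases hA : k ≠ "" ∧ d.contains k = true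
      · exfalso
        have hkl : k ∉ l := fun hk => pv_no_cycle_not_mem hnc hch hk
        have hch' : pvIsChain d (l ++ [k]) (d.getD k "") := pvIsChain_snoc l k hch hA
        have hnd' : (l ++ [k]).Nodup := by
          rw [List.nodup_append]
          refine ⟨hnd, List.nodup_singleton k, ?_⟩
          intro a ha b hb
          rw [List.mem_singleton] at hb
          subst hb
          exact fun h => hkl (h ▸ ha)
        have hsub : l ++ [k] ⊆ d.keys := by
          intro c hc
          exact (PySem.Dict.contains_iff_mem_keys _ _).1 (pvIsChain_active _ _ c hch' hc).2
        have := (List.subperm_of_subset hnd' hsub).length_le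
        simp at this; omega
      · exact ⟨0, le_refl 0, pvHalts.stop k hA⟩
  | succ m ih =>
      intro k l hch hnd hlen
      by_cases hA : k ≠ "" ∧ d.contains k = true
      · have hkl : k ∉ l := fun hk => pv_no_cycle_not_mem hnc hch hk
        have hch' : pvIsChain d (l ++ [k]) (d.getD k "") := pvIsChain_snoc l k hch hA
        have hnd' : (l ++ [k]).Nodup := by
          rw [List.nodup_append]
          refine ⟨hnd, List.nodup_singleton k, ?_⟩
          intro a ha b hb
          rw [List.mem_singleton] at hb
          subst hb
          exact fun h => hkl (h ▸ ha)
        obtain ⟨n, hn, hh⟩ := ih (d.getD k "") (l ++ [k]) hch' hnd' (by simp; omega)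
        exact ⟨n + 1, by omega, pvHalts.step k n hA hh⟩
      · exact ⟨0, by omega, pvHalts.stop k hA⟩

theorem pvHalts_all {d : PySem.Dict String String}
    (hnc : ∀ S ∈ d.keys.sublists, S ≠ [] → ∃ k ∈ S, k = "" ∨ d.getD k "" ∉ S)
    (k : String) : ∃ n ≤ d.keys.length, pvHalts d n k := by
  obtain ⟨n, hn, hh⟩ := pvHalts_aux hnc d.keys.length k [] trivial List.nodup_nil (by simp)
  exact ⟨n, hn, hh⟩

-- B's memo invariant: every memoized value is the halting depth of its key
def pvInv (d : PySem.Dict String String) (memo : PySem.Dict String Int) : Prop :=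
  ∀ k v, memo.get? k = some v → ∃ n, pvHalts d n k ∧ v = (n : Int)

theorem pvWalkB_path {d : PySem.Dict String String} {memo : PySem.Dict String Int} :
    ∀ (f : Nat) (k : String) (p : List String),
      pvWalkB d memo f k p = ((pvWalkB d memo f k []).1, p ++ (pvWalkB d memo f k []).2) := by
  intro f
  induction f with
  | zero => intro k p; simp [pvWalkB]
  | succ f ih =>
      intro k p
      by_cases h : k ≠ "" ∧ d.contains k = true ∧ memo.contains k = false
      · simp only [pvWalkB, if_pos h]
        rw [ih (d.getD k "") (p ++ [k]), ih (d.getD k "") ([] ++ [k])]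
        simp
      · simp [pvWalkB, if_neg h]

-- one iteration of B's outer loop computes the halting depth and preserves the invariant
theorem pvStepB_spec {d : PySem.Dict String String} {memo : PySem.Dict String Int}
    {n : Nat} {sat : String} (hh : pvHalts d n sat) (hInv : pvInv d memo) :
    ∀ f, n ≤ f →
      (pvAssignB (pvWalkB d memo f sat []).2.reverse
        (if (pvWalkB d memo f sat []).1 ≠ "" then memo.getD (pvWalkB d memo f sat []).1 0 else 0)
        memo).1 = (n : Int) ∧
      pvInv d (pvAssignB (pvWalkB d memo f sat []).2.reverse
        (if (pvWalkB d memo f sat []).1 ≠ "" then memo.getD (pvWalkB d memo f sat []).1 0 else 0)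
        memo).2 := by
  induction hh with
  | stop k h =>
      intro f _
      have hw : pvWalkB d memo f k [] = (k, []) := by
        cases f with
        | zero => rfl
        | succ f =>
            have : ¬(k ≠ "" ∧ d.contains k = true ∧ memo.contains k = false) := by
              intro hc; exact h ⟨hc.1, hc.2.1⟩
            simp [pvWalkB, if_neg this]
      rw [hw]
      by_cases hk : k = ""
      · simp [pvAssignB, hk, hInv]
      · have hget : memo.getD k 0 = 0 := by
          rcases hmem : memo.get? k with _ | v
          · rw [PySem.Dict.getD_eq_get?_getD, hmem]; rfl
          · obtain ⟨m, hm, rfl⟩ := hInv k v hmem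
            have : m = 0 := pvHalts_unique hm (pvHalts.stop k h)
            subst this
            rw [PySem.Dict.getD_eq_get?_getD, hmem]; rfl
        simp [pvAssignB, hk, hget, hInv]
  | step k n hA hh' IH =>
      intro f hf
      cases f with
      | zero => omega
      | succ f =>
        by_cases hmemo : memo.contains k = true
        · -- memoized: walk stops immediately, d0 is the cached depth
          have hcond : ¬(k ≠ "" ∧ d.contains k = true ∧ memo.contains k = false) := by
            intro hc; rw [hmemo] at hc; exact absurd hc.2.2 (by simp)
          have hw : pvWalkB d memo (f + 1) k [] = (k, []) := by
            simp [pvWalkB, if_neg hcond]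
          rw [hw]
          rcases hmem : memo.get? k with _ | v
          · rw [PySem.Dict.contains_eq_isSome_get?, hmem] at hmemo; simp at hmemo
          · obtain ⟨m, hm, rfl⟩ := hInv k v hmem
            have : m = n + 1 := pvHalts_unique hm (pvHalts.step k n hA hh')
            subst this
            have hget : memo.getD k 0 = ((n + 1 : Nat) : Int) := by
              rw [PySem.Dict.getD_eq_get?_getD, hmem]; rfl
            simp [pvAssignB, hA.1, hget, hInv]
        · -- not memoized: walk takes one step, then the IH applies to the parent
          have hmemo' : memo.contains k = false := by
            simpa using hmemo
          have hcond : k ≠ "" ∧ d.contains k = true ∧ memo.contains k = false :=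
            ⟨hA.1, hA.2, hmemo'⟩
          have hw : pvWalkB d memo (f + 1) k [] =
              ((pvWalkB d memo f (d.getD k "") []).1,
               k :: (pvWalkB d memo f (d.getD k "") []).2) := by
            simp only [pvWalkB, if_pos hcond, List.nil_append]
            rw [pvWalkB_path f (d.getD k "") [k]]
            simp
          rw [hw]
          obtain ⟨hdv, hinv'⟩ := IH f (by omega)
          set W := pvWalkB d memo f (d.getD k "") [] with hW
          set d0 : Int := (if W.1 ≠ "" then memo.getD W.1 0 else 0) with hd0
          set P := pvAssignB W.2.reverse d0 memo with hP
          have hsplit : pvAssignB (k :: W.2).reverse d0 memo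
              = (P.1 + 1, P.2.insert k (P.1 + 1)) := by
            rw [hP]
            simp only [pvAssignB, List.reverse_cons, List.foldl_append,
              List.foldl_cons, List.foldl_nil]
          rw [hsplit]
          constructor
          · show P.1 + 1 = ((n + 1 : Nat) : Int)
            rw [hdv]; push_cast; ring
          · intro x v hx
            simp only at hx
            rw [PySem.Dict.get?_insert] at hx
            split_ifs at hx with hxk
            · subst hxk
              refine ⟨n + 1, pvHalts.step x n hA hh', ?_⟩
              cases hx
              rw [hdv]; push_cast; ring
            · exact hinv' x v hx

theorem pv_outer {d : PySem.Dict String String}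
    (hH : ∀ k, ∃ n ≤ d.keys.length, pvHalts d n k) :
    ∀ (ks : List String) (memo : PySem.Dict String Int) (acc : Int), pvInv d memo →
      (ks.foldl (pvStepB d) (memo, acc)).2 =
        ks.foldl (fun r sat => r + pvChainA d (d.size + 1) sat) acc := by
  intro ks
  induction ks with
  | nil => intro memo acc _; rfl
  | cons sat ks ih =>
      intro memo acc hInv
      obtain ⟨n, hn, hh⟩ := hH sat
      have hsize : d.size = d.keys.length := by
        simp [PySem.Dict.size, PySem.Dict.keys]
      obtain ⟨hdv, hinv'⟩ := pvStepB_spec hh hInv (d.size + 1) (by omega)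
      have hchain : pvChainA d (d.size + 1) sat = (n : Int) :=
        pvChainA_of_halts hh (d.size + 1) (by omega)
      simp only [List.foldl_cons]
      rw [show pvStepB d (memo, acc) sat =
        ((pvAssignB (pvWalkB d memo (d.size + 1) sat []).2.reverse
          (if (pvWalkB d memo (d.size + 1) sat []).1 ≠ "" then
            memo.getD (pvWalkB d memo (d.size + 1) sat []).1 0 else 0) memo).2,
         acc + (pvAssignB (pvWalkB d memo (d.size + 1) sat []).2.reverse
          (if (pvWalkB d memo (d.size + 1) sat []).1 ≠ "" then
            memo.getD (pvWalkB d memo (d.size + 1) sat []).1 0 else 0) memo).1) from rfl]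
      rw [hdv, hchain, ih _ (acc + (n : Int)) hinv']

-- ===== VERDICT (by name: the statement is the Claim_ definition above) =====
theorem calculate_orbits_spec : Claim_equal_calculate_orbits := by
  intro oa _ hpre
  unfold Spec_calculate_orbits calculate_orbits calculate_orbits_alt
  have hH := pvHalts_all (d := PySem.Dict.ofList oa) hpre
  have := pv_outer (d := PySem.Dict.ofList oa)
    (fun k => hH k) (PySem.Dict.ofList oa).keys PySem.Dict.empty 0
    (by intro k v h; simp [PySem.Dict.get?_empty] at h)
  simp only [this]
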